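-- pv_equiv track=rewrite | github.com/MrBrantCode/unitest_baseline | mut_generate/mist_train_taco/taco_5487/solution.py | calculate_game_clear_probability
-- ===== SOURCE A (Python) =====
-- def calculate_game_clear_probability(n, k, a):
--     mod = 998244353
--
--     lst = [0] * (k + 1)
--     lst[-2] = 1
--
--     A = a * pow(100 * n, mod - 2, mod)
--     inv = pow(n, mod - 2, mod)
--
--     for i in range(k - 1)[::-1]:
--         if k > i + n:
--             lst[i] = A * (lst[i + 1] - lst[i + n + 1]) + lst[i + 1]
--             lst[i] %= mod
--         else:
--             lst[i] = A * (lst[i + 1] - lst[k]) + (n - (k - i) + 1) * inv + lst[i + 1]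
--             lst[i] %= mod
--
--     return (lst[0] - lst[1]) % mod
-- ===== SOURCE B (Python) =====
-- def calculate_game_clear_probability(n, k, a):
--     mod = 998244353
--     A = a * pow(100 * n, mod - 2, mod) % mod
--     inv = pow(n, mod - 2, mod)
--     p = [0] * (k + 1)
--     p[k - 1] = 1
--     s = 1
--     for i in range(k - 2, -1, -1):
--         if i + n < k:
--             p[i] = A * s % mod
--         else:
--             p[i] = (A * s + (n - (k - i) + 1) * inv) % mod
--         s += p[i]
--         if i + n <= k - 1:
--             s -= p[i + n]
--         s %= mod
--     return p[0] % mod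
-- ===== Notes on version B (the rewrite author's own statement) =====
-- stated objective: alternative
-- what changed: A runs a backward DP on a cumulative array lst where lst[i] encodes a suffix-accumulated probability and each step takes a difference lst[i+1]-lst[i+n+1]; B instead computes the per-state clear probabilities p[i] (= A's lst[i]-lst[i+1]) directly, maintaining an explicit sliding-window running sum of the next up-to-n probabilities, and returns p[0] mod 998244353.
-- outside the precondition, e.g. on calculate_game_clear_probability(-8, 7, 7): A returns 0, B returns 647611024
import Mathlib
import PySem

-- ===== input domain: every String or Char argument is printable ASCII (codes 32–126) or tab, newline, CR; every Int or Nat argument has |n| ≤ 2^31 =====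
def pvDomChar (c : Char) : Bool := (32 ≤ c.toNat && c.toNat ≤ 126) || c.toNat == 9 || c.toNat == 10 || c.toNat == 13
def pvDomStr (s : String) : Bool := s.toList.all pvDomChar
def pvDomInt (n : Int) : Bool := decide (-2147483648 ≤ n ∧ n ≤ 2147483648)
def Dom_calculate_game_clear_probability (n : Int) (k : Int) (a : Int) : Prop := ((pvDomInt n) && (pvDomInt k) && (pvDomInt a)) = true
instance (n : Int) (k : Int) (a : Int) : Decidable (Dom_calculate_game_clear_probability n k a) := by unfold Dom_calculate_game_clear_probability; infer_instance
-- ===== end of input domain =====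

-- B replaces A's cumulative-list encoding (lst[i] ≈ Σ of clear probabilities) by a direct backward
-- DP on the per-state clear probabilities p[i], maintaining an explicit sliding-window sum; same cost.

-- ===== PORT A =====
-- hand port of Python's three-argument pow(b, e, m): square-and-multiply modular exponentiation.
-- (PySem.Int.powMod specifies the same value but materialises b^e, infeasible for e ~ 10^9.)
-- Exact for m > 0 (the only form both Pythons use): returns b^e mod m with Python's floor mod.
def pyPowMod (b : Int) (e : Nat) (m : Int) : Int :=
  if he : e = 0 then PySem.Int.mod 1 m
  else
    let h := pyPowMod (PySem.Int.mod (b * b) m) (e / 2) m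
    if e % 2 = 1 then PySem.Int.mod (h * b) m else h
termination_by e
decreasing_by exact Nat.div_lt_self (Nat.pos_of_ne_zero he) one_lt_two

-- loop body of A: lst[i] = …; lst[i] %= mod  (the two Python statements fused into one write of the
-- reduced value). The Python list is an Array Int; every index below is nonnegative and in bounds on
-- each loop iteration under Pre_ (n ≥ 1, k ≥ 1), where getD/setIfInBounds are exactly lst[·].
def gameA_step (n k A inv : Int) (lst : Array Int) (i : Int) : Array Int :=
  if k > i + n then
    lst.setIfInBounds i.toNat (PySem.Int.mod
      (A * (lst.getD (i + 1).toNat 0 - lst.getD (i + n + 1).toNat 0)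
        + lst.getD (i + 1).toNat 0) 998244353)
  else
    lst.setIfInBounds i.toNat (PySem.Int.mod
      (A * (lst.getD (i + 1).toNat 0 - lst.getD k.toNat 0)
        + (n - (k - i) + 1) * inv + lst.getD (i + 1).toNat 0) 998244353)

-- range(k-1)[::-1] is (pyRange 0 (k-1)).reverse by PySem.List.slice?_none_none_neg_one
def calculate_game_clear_probability (n : Int) (k : Int) (a : Int) : Int :=
  let lst0 : Array Int := Array.replicate (k + 1).toNat 0       -- [0] * (k + 1)
  let lst1 := lst0.setIfInBounds (lst0.size - 2) 1              -- lst[-2] = 1  (size ≥ 2 under Pre_)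
  let A := a * pyPowMod (100 * n) 998244351 998244353
  let inv := pyPowMod n 998244351 998244353
  let lst2 := ((PySem.List.pyRange 0 (k - 1)).reverse).foldl (gameA_step n k A inv) lst1
  PySem.Int.mod (lst2.getD 0 0 - lst2.getD 1 0) 998244353

-- ===== PORT B =====
-- loop body of B (Source B): compute p[i] from the window sum s, then slide the window
def gameB_step (n k A inv : Int) (st : Array Int × Int) (i : Int) : Array Int × Int :=
  match st with
  | (p, s) =>
    let pi := if i + n < k then PySem.Int.mod (A * s) 998244353
              else PySem.Int.mod (A * s + (n - (k - i) + 1) * inv) 998244353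
    let p2 := p.setIfInBounds i.toNat pi
    let s2 := s + pi
    let s3 := if i + n ≤ k - 1 then s2 - p2.getD (i + n).toNat 0 else s2
    (p2, PySem.Int.mod s3 998244353)

def calculate_game_clear_probability_alt (n : Int) (k : Int) (a : Int) : Int :=
  let A := PySem.Int.mod (a * pyPowMod (100 * n) 998244351 998244353) 998244353
  let inv := pyPowMod n 998244351 998244353
  let p0 : Array Int := Array.replicate (k + 1).toNat 0
  let p1 := p0.setIfInBounds (k - 1).toNat 1
  let st := (PySem.List.pyRange (k - 2) (-1) (-1)).foldl (gameB_step n k A inv) (p1, 1)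
  PySem.Int.mod (st.1.getD 0 0) 998244353

-- ===== PRECONDITION & SPEC =====
-- Pre_ restricts to the problem's natural domain: n ≥ 1 (die faces) and k ≥ 1 (health).
-- A raises IndexError for k ≤ 0; for n ≤ 0 A still returns, but its value arises from
-- negative-index wraparound (lst[i+n+1] reading from the list's end), an accident of the encoding.
def Pre_calculate_game_clear_probability (n : Int) (k : Int) (a : Int) : Prop := 1 ≤ n ∧ 1 ≤ k
instance (n : Int) (k : Int) (a : Int) : Decidable (Pre_calculate_game_clear_probability n k a) := by unfold Pre_calculate_game_clear_probability; infer_instance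
def pvWitness_calculate_game_clear_probability : Int × Int × Int := (2, 3, 50)

def Spec_calculate_game_clear_probability (n : Int) (k : Int) (a : Int) (out : Int) : Prop := out = calculate_game_clear_probability_alt n k a
instance (n : Int) (k : Int) (a : Int) (out : Int) : Decidable (Spec_calculate_game_clear_probability n k a out) := by unfold Spec_calculate_game_clear_probability; infer_instance

-- ===== CLAIM (what is proved, stated in full; the proofs are below) =====
def Claim_equal_calculate_game_clear_probability : Prop := ∀ (n : Int) (k : Int) (a : Int), Dom_calculate_game_clear_probability n k a → Pre_calculate_game_clear_probability n k a → Spec_calculate_game_clear_probability n k a (calculate_game_clear_probability n k a)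

-- ===== LEMMAS AND PROOFS =====


theorem pvArr_getD (xs : Array Int) (i : Nat) (d : Int) : xs.getD i d = xs.toList.getD i d := by
  rw [Array.getD_eq_getD_getElem?, List.getD_eq_getElem?_getD, Array.getElem?_toList]

theorem pvGetD_set_self (xs : List Int) (i : Nat) (v : Int) (h : i < xs.length) :
    (xs.set i v).getD i 0 = v := by
  simp [List.getD, h]

theorem pvGetD_set_ne (xs : List Int) (i j : Nat) (v : Int) (h : j ≠ i) :
    (xs.set i v).getD j 0 = xs.getD j 0 := by
  simp [List.getD, Ne.symm h]

-- the loop invariant: lst's entries are congruent to suffix sums of p, p's entries are reduced,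
-- and s is congruent to the window sum for the next index M-1
def GInv (K N M : Nat) (lst p : List Int) (s : Int) : Prop :=
  lst.length = K + 1 ∧ p.length = K + 1 ∧
  (∀ j : Nat, M ≤ j → j ≤ K → Int.ModEq 998244353 (lst.getD j 0) (∑ t ∈ Finset.Ico j K, p.getD t 0)) ∧
  (∀ j : Nat, 0 ≤ p.getD j 0 ∧ p.getD j 0 < 998244353) ∧
  Int.ModEq 998244353 s (∑ t ∈ Finset.Ico M (min (M + N) K), p.getD t 0)

theorem sum_Ico_split_bot (f : Nat → Int) (M T : Nat) (h : M < T) :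
    ∑ t ∈ Finset.Ico M T, f t = f M + ∑ t ∈ Finset.Ico (M + 1) T, f t := by
  rw [← Finset.sum_Ico_consecutive f (Nat.le_succ M) h, Finset.sum_Ico_succ_top (le_refl M),
    Finset.Ico_self, Finset.sum_empty, zero_add]

theorem modeq_emod_left (x y : Int) (h : Int.ModEq 998244353 x y) :
    Int.ModEq 998244353 (x % 998244353) y :=
  (Int.emod_emod_of_dvd x dvd_rfl).trans h

theorem gstep (K N M : Nat) (AA AB inv : Int) (hA : Int.ModEq 998244353 AA AB)
    (hN : 1 ≤ N) (hM : M + 2 ≤ K) (lst p : Array Int) (s : Int)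
    (h : GInv K N (M + 1) lst.toList p.toList s) :
    GInv K N M (gameA_step (N : Int) (K : Int) AA inv lst (M : Int)).toList
      ((gameB_step (N : Int) (K : Int) AB inv (p, s) (M : Int)).1.toList)
      ((gameB_step (N : Int) (K : Int) AB inv (p, s) (M : Int)).2) := by
  obtain ⟨hlenA, hlenP, hcong, hrange, hs⟩ := h
  have mpos : (0:Int) < 998244353 := by norm_num
  unfold gameA_step gameB_step
  dsimp only
  rw [show ((M:Int) + 1).toNat = M + 1 by omega,
      show ((M:Int) + (N:Int) + 1).toNat = M + N + 1 by omega,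
      show ((M:Int)).toNat = M by omega,
      show ((K:Int)).toNat = K by omega,
      show ((M:Int) + (N:Int)).toNat = M + N by omega]
  by_cases hc : M + N < K
  · rw [if_pos (show (K:Int) > (M:Int) + (N:Int) by omega),
        if_pos (show (M:Int) + (N:Int) < (K:Int) by omega),
        if_pos (show (M:Int) + (N:Int) ≤ (K:Int) - 1 by omega)]
    simp only [Array.toList_setIfInBounds, pvArr_getD, PySem.Int.mod_eq_emod_of_pos mpos]
    set pi : Int := (AB * s) % 998244353 with hpi
    have hpiM : pi ≡ AB * s [ZMOD 998244353] := modeq_emod_left _ _ (Int.ModEq.refl _)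
    have hMlt : M < p.toList.length := by omega
    have hMltA : M < lst.toList.length := by omega
    have hminS : min (M + 1 + N) K = M + N + 1 := by omega
    rw [hminS] at hs
    have hsetne : ∀ t : Nat, t ≠ M → (p.toList.set M pi).getD t 0 = p.toList.getD t 0 :=
      fun t ht => pvGetD_set_ne p.toList M t pi ht
    have hWsplit : (∑ t ∈ Finset.Ico (M+1) K, p.toList.getD t 0)
        = (∑ t ∈ Finset.Ico (M+1) (M+N+1), p.toList.getD t 0)
          + (∑ t ∈ Finset.Ico (M+N+1) K, p.toList.getD t 0) := by
      rw [Finset.sum_Ico_consecutive _ (by omega : M+1 ≤ M+N+1) (by omega : M+N+1 ≤ K)]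
    have hStop : (∑ t ∈ Finset.Ico (M+1) (M+N+1), p.toList.getD t 0)
        = (∑ t ∈ Finset.Ico (M+1) (M+N), p.toList.getD t 0) + p.toList.getD (M+N) 0 := by
      rw [Finset.sum_Ico_succ_top (by omega : M+1 ≤ M+N)]
    refine ⟨by simp [hlenA], by simp [hlenP], ?_, ?_, ?_⟩
    · intro j hMj hjK
      by_cases hjM : j = M
      · subst hjM
        rw [pvGetD_set_self lst.toList j _ hMltA]
        rw [sum_Ico_split_bot _ j K (by omega), pvGetD_set_self p.toList j pi hMlt]
        rw [Finset.sum_congr rfl (fun t ht => hsetne t (by simp [Finset.mem_Ico] at ht; omega))]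
        apply modeq_emod_left
        have h1 := hcong (j+1) (by omega) (by omega)
        have h2 := hcong (j+N+1) (by omega) (by omega)
        have hval : AA * (lst.toList.getD (j+1) 0 - lst.toList.getD (j+N+1) 0) + lst.toList.getD (j+1) 0
            ≡ AA * ((∑ t ∈ Finset.Ico (j+1) K, p.toList.getD t 0)
                - (∑ t ∈ Finset.Ico (j+N+1) K, p.toList.getD t 0))
              + (∑ t ∈ Finset.Ico (j+1) K, p.toList.getD t 0) [ZMOD 998244353] :=
          ((Int.ModEq.refl AA).mul (h1.sub h2)).add h1
        have hpis : pi ≡ AA * (∑ t ∈ Finset.Ico (j+1) (j+N+1), p.toList.getD t 0) [ZMOD 998244353] :=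
          hpiM.trans ((hA.symm.mul (Int.ModEq.refl s)).trans ((Int.ModEq.refl AA).mul hs))
        refine hval.trans ?_
        have : AA * ((∑ t ∈ Finset.Ico (j+1) K, p.toList.getD t 0)
              - (∑ t ∈ Finset.Ico (j+N+1) K, p.toList.getD t 0))
            = AA * (∑ t ∈ Finset.Ico (j+1) (j+N+1), p.toList.getD t 0) := by rw [hWsplit]; ring
        rw [this]
        exact (hpis.symm).add_right _
      · have hj1 : M + 1 ≤ j := by omega
        rw [pvGetD_set_ne lst.toList M j _ hjM,
          Finset.sum_congr rfl (fun t ht => hsetne t (by simp [Finset.mem_Ico] at ht; omega))]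
        exact hcong j hj1 hjK
    · intro j
      by_cases hjM : j = M
      · subst hjM
        rw [pvGetD_set_self p.toList j pi hMlt]
        exact ⟨Int.emod_nonneg _ (by norm_num), Int.emod_lt_of_pos _ mpos⟩
      · rw [pvGetD_set_ne p.toList M j pi hjM]; exact hrange j
    · rw [show min (M + N) K = M + N by omega]
      apply modeq_emod_left
      rw [pvGetD_set_ne p.toList M (M+N) pi (by omega)]
      rw [sum_Ico_split_bot _ M (M+N) (by omega), pvGetD_set_self p.toList M pi hMlt]
      rw [Finset.sum_congr rfl (fun t ht => hsetne t (by simp [Finset.mem_Ico] at ht; omega))]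
      have : s + pi - p.toList.getD (M+N) 0
          ≡ (∑ t ∈ Finset.Ico (M+1) (M+N+1), p.toList.getD t 0) + pi
            - p.toList.getD (M+N) 0 [ZMOD 998244353] :=
        (hs.add_right pi).sub_right _
      refine this.trans ?_
      rw [hStop]
      have : (∑ t ∈ Finset.Ico (M+1) (M+N), p.toList.getD t 0) + p.toList.getD (M+N) 0 + pi
          - p.toList.getD (M+N) 0
          = pi + (∑ t ∈ Finset.Ico (M+1) (M+N), p.toList.getD t 0) := by ring
      rw [this]
  · rw [if_neg (show ¬ (K:Int) > (M:Int) + (N:Int) by omega),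
        if_neg (show ¬ ((M:Int) + (N:Int) < (K:Int)) by omega),
        if_neg (show ¬ ((M:Int) + (N:Int) ≤ (K:Int) - 1) by omega)]
    simp only [Array.toList_setIfInBounds, pvArr_getD, PySem.Int.mod_eq_emod_of_pos mpos]
    set E : Int := ((N:Int) - ((K:Int) - (M:Int)) + 1) * inv with hE
    set pi : Int := (AB * s + E) % 998244353 with hpi
    have hpiM : pi ≡ AB * s + E [ZMOD 998244353] := modeq_emod_left _ _ (Int.ModEq.refl _)
    have hMlt : M < p.toList.length := by omega
    have hMltA : M < lst.toList.length := by omega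
    rw [show min (M + 1 + N) K = K by omega] at hs
    have hsetne : ∀ t : Nat, t ≠ M → (p.toList.set M pi).getD t 0 = p.toList.getD t 0 :=
      fun t ht => pvGetD_set_ne p.toList M t pi ht
    have hK0 := hcong K (by omega) (le_refl K)
    rw [Finset.Ico_self, Finset.sum_empty] at hK0
    have hpis : pi ≡ AA * (∑ t ∈ Finset.Ico (M+1) K, p.toList.getD t 0) + E [ZMOD 998244353] :=
      hpiM.trans (((hA.symm.mul (Int.ModEq.refl s)).add_right E).trans
        (((Int.ModEq.refl AA).mul hs).add_right E))
    refine ⟨by simp [hlenA], by simp [hlenP], ?_, ?_, ?_⟩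
    · intro j hMj hjK
      by_cases hjM : j = M
      · subst hjM
        rw [pvGetD_set_self lst.toList j _ hMltA]
        rw [sum_Ico_split_bot _ j K (by omega), pvGetD_set_self p.toList j pi hMlt]
        rw [Finset.sum_congr rfl (fun t ht => hsetne t (by simp [Finset.mem_Ico] at ht; omega))]
        apply modeq_emod_left
        have h1 := hcong (j+1) (by omega) (by omega)
        have hval : AA * (lst.toList.getD (j+1) 0 - lst.toList.getD K 0) + E + lst.toList.getD (j+1) 0
            ≡ AA * ((∑ t ∈ Finset.Ico (j+1) K, p.toList.getD t 0) - 0) + E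
              + (∑ t ∈ Finset.Ico (j+1) K, p.toList.getD t 0) [ZMOD 998244353] :=
          (((Int.ModEq.refl AA).mul (h1.sub hK0)).add_right E).add h1
        refine hval.trans ?_
        rw [show AA * ((∑ t ∈ Finset.Ico (j+1) K, p.toList.getD t 0) - 0) + E
              + (∑ t ∈ Finset.Ico (j+1) K, p.toList.getD t 0)
            = (AA * (∑ t ∈ Finset.Ico (j+1) K, p.toList.getD t 0) + E)
              + (∑ t ∈ Finset.Ico (j+1) K, p.toList.getD t 0) by ring]
        exact (hpis.symm).add_right _
      · have hj1 : M + 1 ≤ j := by omega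
        rw [pvGetD_set_ne lst.toList M j _ hjM,
          Finset.sum_congr rfl (fun t ht => hsetne t (by simp [Finset.mem_Ico] at ht; omega))]
        exact hcong j hj1 hjK
    · intro j
      by_cases hjM : j = M
      · subst hjM
        rw [pvGetD_set_self p.toList j pi hMlt]
        exact ⟨Int.emod_nonneg _ (by norm_num), Int.emod_lt_of_pos _ mpos⟩
      · rw [pvGetD_set_ne p.toList M j pi hjM]; exact hrange j
    · rw [show min (M + N) K = K by omega]
      apply modeq_emod_left
      rw [sum_Ico_split_bot _ M K (by omega), pvGetD_set_self p.toList M pi hMlt]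
      rw [Finset.sum_congr rfl (fun t ht => hsetne t (by simp [Finset.mem_Ico] at ht; omega))]
      refine (hs.add_right pi).trans ?_
      rw [show (∑ t ∈ Finset.Ico (M+1) K, p.toList.getD t 0) + pi
          = pi + (∑ t ∈ Finset.Ico (M+1) K, p.toList.getD t 0) by ring]

theorem gfold (K N : Nat) (AA AB inv : Int) (hA : Int.ModEq 998244353 AA AB) (hN : 1 ≤ N) :
    ∀ (M : Nat), M + 1 ≤ K → ∀ (lst p : Array Int) (s : Int), GInv K N M lst.toList p.toList s →
    GInv K N 0 (((PySem.List.pyRange 0 (M : Int)).reverse).foldl (gameA_step (N : Int) (K : Int) AA inv) lst).toList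
      (((((PySem.List.pyRange 0 (M : Int)).reverse).foldl (gameB_step (N : Int) (K : Int) AB inv) (p, s)).1).toList)
      ((((PySem.List.pyRange 0 (M : Int)).reverse).foldl (gameB_step (N : Int) (K : Int) AB inv) (p, s)).2) := by
  intro M
  induction M with
  | zero =>
    intro _ lst p s h
    rw [show ((0:Nat):Int) = 0 by norm_num, PySem.List.pyRange_one_eq_nil (le_refl 0)]
    simpa using h
  | succ M ih =>
    intro hM1 lst p s h
    rw [show ((M+1:Nat):Int) = (M:Int) + 1 by omega,
      PySem.List.pyRange_one_succ_right (by positivity), List.reverse_append]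
    simp only [List.reverse_singleton, List.singleton_append, List.foldl_cons]
    have hstep := gstep K N M AA AB inv hA hN (by omega) lst p s h
    have hres := ih (by omega) (gameA_step (N:Int) (K:Int) AA inv lst (M:Int))
      ((gameB_step (N:Int) (K:Int) AB inv (p, s) (M:Int)).1)
      ((gameB_step (N:Int) (K:Int) AB inv (p, s) (M:Int)).2) hstep
    simpa using hres

theorem getD_replicate_zero (L j : Nat) : (List.replicate L (0:Int)).getD j 0 = 0 := by
  simp [List.getD, List.getElem?_replicate]
  split <;> rfl

theorem hinit_lemma (K N : Nat) (hK1 : 1 ≤ K) (hN1 : 1 ≤ N) :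
    GInv K N (K-1) ((List.replicate (K+1) (0:Int)).set (K-1) 1)
      ((List.replicate (K+1) (0:Int)).set (K-1) 1) 1 := by
  have hlen : ((List.replicate (K+1) (0:Int)).set (K-1) 1).length = K + 1 := by simp
  have hself : ((List.replicate (K+1) (0:Int)).set (K-1) 1).getD (K-1) 0 = 1 :=
    pvGetD_set_self _ _ _ (by simp only [List.length_replicate]; omega)
  have hother : ∀ j : Nat, j ≠ K-1 → ((List.replicate (K+1) (0:Int)).set (K-1) 1).getD j 0 = 0 := by
    intro j hj
    rw [pvGetD_set_ne _ _ _ _ hj, getD_replicate_zero]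
  have hIco : Finset.Ico (K-1) K = {K-1} := by ext t; simp [Finset.mem_Ico]; omega
  have hsum : ∑ t ∈ Finset.Ico (K-1) K, ((List.replicate (K+1) (0:Int)).set (K-1) 1).getD t 0 = 1 := by
    rw [hIco, Finset.sum_singleton, hself]
  refine ⟨hlen, hlen, ?_, ?_, ?_⟩
  · intro j hj hjK
    by_cases hjm : j = K - 1
    · subst hjm; rw [hself, hsum]
    · have hjK' : j = K := by omega
      rw [hjK', hother K (by omega), Finset.Ico_self, Finset.sum_empty]
  · intro j
    by_cases hjm : j = K - 1
    · subst hjm; rw [hself]; norm_num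
    · rw [hother j hjm]; norm_num
  · rw [show min (K - 1 + N) K = K by omega, hsum]

-- ===== VERDICT (by name: the statement is the Claim_ definition above) =====
theorem calculate_game_clear_probability_spec : Claim_equal_calculate_game_clear_probability := by
  intro n k a _hdom hpre
  obtain ⟨hn, hk⟩ := hpre
  obtain ⟨N, rfl⟩ : ∃ N : Nat, n = (N:Int) := ⟨n.toNat, by omega⟩
  obtain ⟨K, rfl⟩ : ∃ K : Nat, k = (K:Int) := ⟨k.toNat, by omega⟩
  have hN1 : 1 ≤ N := by exact_mod_cast hn
  have hK1 : 1 ≤ K := by exact_mod_cast hk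
  have mpos : (0:Int) < 998244353 := by norm_num
  unfold Spec_calculate_game_clear_probability calculate_game_clear_probability
    calculate_game_clear_probability_alt
  dsimp only
  rw [PySem.List.pyRange_neg_one_eq_reverse]
  rw [show ((-1:Int) + 1) = 0 by norm_num, show ((K:Int) - 2 + 1) = (K:Int) - 1 by ring]
  rw [show ((K:Int) + 1).toNat = K + 1 by omega]
  rw [show ((K:Int) - 1) = ((K - 1 : Nat) : Int) by omega]
  rw [show (Array.replicate (K+1) (0:Int)).size - 2 = K - 1 by rw [Array.size_replicate]; omega]
  rw [show (((K - 1 : Nat) : Int)).toNat = K - 1 by omega]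
  simp only [PySem.Int.mod_eq_emod_of_pos mpos, pvArr_getD]
  have hinitL : GInv K N (K-1)
      ((Array.replicate (K+1) (0:Int)).setIfInBounds (K-1) 1).toList
      ((Array.replicate (K+1) (0:Int)).setIfInBounds (K-1) 1).toList 1 := by
    simp only [Array.toList_setIfInBounds, Array.toList_replicate]
    exact hinit_lemma K N hK1 hN1
  have hfold := gfold K N (a * pyPowMod (100 * (N:Int)) 998244351 998244353)
    ((a * pyPowMod (100 * (N:Int)) 998244351 998244353) % 998244353)
    (pyPowMod (N:Int) 998244351 998244353)
    ((Int.emod_emod_of_dvd _ dvd_rfl).symm) hN1 (K-1) (by omega)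
    ((Array.replicate (K+1) (0:Int)).setIfInBounds (K-1) 1)
    ((Array.replicate (K+1) (0:Int)).setIfInBounds (K-1) 1) 1 hinitL
  obtain ⟨_, _, hcong, _, _⟩ := hfold
  have h0 := hcong 0 (le_refl 0) (by omega)
  have h1 := hcong 1 (by omega) hK1
  have hd := h0.sub h1
  have hsum : ∀ q : List Int, (∑ t ∈ Finset.Ico 0 K, q.getD t 0) - (∑ t ∈ Finset.Ico 1 K, q.getD t 0)
      = q.getD 0 0 := by
    intro q; rw [sum_Ico_split_bot _ 0 K (by omega)]; ring
  rw [hsum] at hd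
  exact hd
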